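-- pv_equiv track=rewrite | github.com/ASSERT-KTH/Mokav | experiments/pynguin/c4b/return-lst/generated_tests/src_1795/1/src_1795.py | func
-- ===== SOURCE A (Python) =====
-- def func(*args):
-- 	ret_values = []
--
-- 	s = args[0]
-- 	p = 1
-- 	l = 0
-- 	for i in range(len(s)):
-- 	    if ((s[i] == 'A') or (s[i] == 'O') or (s[i] == 'Y') or (s[i] == 'E') or (s[i] == 'U') or (s[i] == 'I')):
-- 	        if (p > l):
-- 	            l = p
-- 	        p = 1
-- 	    else:
-- 	        p = (p + 1)
-- 	        if (p > l):
-- 	            l = p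
-- 	ret_values.append(l)
--
-- 	return ret_values
-- ===== SOURCE B (Python) =====
-- def func(*args):
--     s = args[0]
--     cuts = [i for i, c in enumerate(s) if c in ('A', 'E', 'I', 'O', 'U', 'Y')]
--     bounds = [-1] + cuts + [len(s)]
--     gaps = [b - a for a, b in zip(bounds, bounds[1:])]
--     return [max(gaps) if s else 0]
-- ===== Notes on version B (the rewrite author's own statement) =====
-- stated objective: alternative
-- what changed: Replaces A's running-counter scan (p,l updated per character) by listing the vowel positions via enumerate and taking the maximum gap between consecutive boundaries with sentinels -1 and len(s).
import Mathlib
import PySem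

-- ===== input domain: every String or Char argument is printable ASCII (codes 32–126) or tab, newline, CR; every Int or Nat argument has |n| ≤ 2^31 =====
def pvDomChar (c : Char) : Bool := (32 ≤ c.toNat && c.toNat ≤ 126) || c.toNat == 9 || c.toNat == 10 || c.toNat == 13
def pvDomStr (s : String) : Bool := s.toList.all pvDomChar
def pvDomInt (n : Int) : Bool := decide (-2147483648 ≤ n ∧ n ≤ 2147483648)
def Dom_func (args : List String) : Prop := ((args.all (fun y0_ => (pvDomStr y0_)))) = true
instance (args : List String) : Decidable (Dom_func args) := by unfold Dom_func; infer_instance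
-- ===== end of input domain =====

-- B replaces A's running-counter scan by listing the vowel positions and taking the maximum
-- gap between consecutive boundaries (sentinels -1 and len(s)); alternative decomposition, same O(n) cost.

-- ===== PORT A =====
-- loop body of A's for-loop, over the state (p, l) and the element s[i]
def funcStep (pl : Int × Int) (c : String) : Int × Int :=
  if c = "A" ∨ c = "O" ∨ c = "Y" ∨ c = "E" ∨ c = "U" ∨ c = "I" then
    (1, if pl.1 > pl.2 then pl.1 else pl.2)
  else
    let p := pl.1 + 1
    (p, if p > pl.2 then p else pl.2)

-- Python's s = args[0] under *args binds s to the single list argument, i.e. to `args` here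
def func (args : List String) : List Int :=
  let ret_values : List Int := []
  let s := args
  let r := (PySem.List.pyRange 0 (s.length : Int) 1).foldl
    (fun (pl : Int × Int) i => funcStep pl (PySem.List.pyGetD s i "")) (1, 0)
  ret_values ++ [r.2]

-- ===== PORT B =====
def func_alt (args : List String) : List Int :=
  let s := args
  let cuts := ((PySem.List.enumerate s 0).filter
      (fun ic => ["A", "E", "I", "O", "U", "Y"].contains ic.2)).map (fun ic => ic.1)
  let bounds := [(-1 : Int)] ++ cuts ++ [(s.length : Int)]
  let gaps := (bounds.zip (PySem.List.slice bounds (some 1) none)).map (fun ab => ab.2 - ab.1)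
  -- max(gaps): gaps is provably nonempty here (bounds has ≥ 2 elements), so the .getD 0 default is dead
  if s ≠ [] then [(PySem.List.max? gaps (fun x => x)).getD 0] else [0]

-- ===== PRECONDITION & SPEC =====
-- A is total on List String (no Pre_ needed)
def Spec_func (args : List String) (out : List Int) : Prop := out = func_alt args
instance (args : List String) (out : List Int) : Decidable (Spec_func args out) := by unfold Spec_func; infer_instance

-- ===== CLAIM (what is proved, stated in full; the proofs are below) =====
def Claim_equal_func : Prop := ∀ (args : List String), Dom_func args → Spec_func args (func args)

-- ===== LEMMAS AND PROOFS =====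

-- reference value: maximum boundary-to-boundary gap of cs, where p is the distance already
-- travelled since the previous boundary
def pvMg : List String → Int → Int
  | [], p => p
  | c :: t, p =>
    if ["A", "E", "I", "O", "U", "Y"].contains c then max p (pvMg t 1) else pvMg t (p + 1)

-- B's intermediate data, named for the proofs
def pvGaps (xs : List Int) : List Int := (xs.zip xs.tail).map (fun ab => ab.2 - ab.1)

def pvBmax : List Int → Int
  | [] => 0
  | x :: t => t.foldl max x

def pvCuts (k : Int) (cs : List String) : List Int :=
  ((PySem.List.enumerate cs k).filter
    (fun ic => ["A", "E", "I", "O", "U", "Y"].contains ic.2)).map (fun ic => ic.1)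

theorem pvMg_cons_pos (c : String) (t : List String) (p : Int)
    (h : ["A", "E", "I", "O", "U", "Y"].contains c = true) :
    pvMg (c :: t) p = max p (pvMg t 1) := by rw [pvMg, if_pos h]

theorem pvMg_cons_neg (c : String) (t : List String) (p : Int)
    (h : ¬ (["A", "E", "I", "O", "U", "Y"].contains c = true)) :
    pvMg (c :: t) p = pvMg t (p + 1) := by rw [pvMg, if_neg h]

theorem pvMg_ge (cs : List String) : ∀ p : Int, p ≤ pvMg cs p := by
  induction cs with
  | nil => intro p; simp [pvMg]
  | cons c t ih =>
    intro p
    by_cases h : ["A", "E", "I", "O", "U", "Y"].contains c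
    · rw [pvMg_cons_pos c t p h]; omega
    · rw [pvMg_cons_neg c t p h]
      exact le_trans (by omega) (ih (p + 1))

theorem vowel_iff (c : String) :
    (c = "A" ∨ c = "O" ∨ c = "Y" ∨ c = "E" ∨ c = "U" ∨ c = "I") ↔
      (["A", "E", "I", "O", "U", "Y"].contains c = true) := by
  simp; tauto

-- A's loop against the reference: l carries the best gap so far, p the current distance
theorem foldA (cs : List String) : ∀ p l : Int, 1 ≤ p → p ≤ l →
    (cs.foldl funcStep (p, l)).2 = max l (pvMg cs p) := by
  induction cs with
  | nil => intro p l h1 h2; simp [pvMg]; omega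
  | cons c t ih =>
    intro p l h1 h2
    by_cases h : ["A", "E", "I", "O", "U", "Y"].contains c
    · have hs : funcStep (p, l) c = (1, l) := by
        simp only [funcStep, if_pos ((vowel_iff c).2 h)]
        simp; omega
      rw [List.foldl_cons, hs, pvMg_cons_pos c t p h, ih 1 l (by omega) (by omega)]
      omega
    · have hc : ¬ (c = "A" ∨ c = "O" ∨ c = "Y" ∨ c = "E" ∨ c = "U" ∨ c = "I") := by
        intro hx; exact h ((vowel_iff c).1 hx)
      have hs : funcStep (p, l) c = (p + 1, max l (p + 1)) := by
        simp only [funcStep, if_neg hc]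
        simp; omega
      rw [List.foldl_cons, hs, pvMg_cons_neg c t p h,
        ih (p + 1) (max l (p + 1)) (by omega) (by omega)]
      have := pvMg_ge t (p + 1)
      omega

theorem foldl_max_comm (t : List Int) : ∀ a x : Int,
    t.foldl max (max a x) = max a (t.foldl max x) := by
  induction t with
  | nil => intro a x; simp
  | cons y t ih =>
    intro a x
    simp only [List.foldl_cons]
    rw [max_assoc, ih]

theorem pvGaps_cons_cons (a b : Int) (t : List Int) :
    pvGaps (a :: b :: t) = (b - a) :: pvGaps (b :: t) := by
  simp [pvGaps]

theorem pvGaps_cons_append_ne_nil (x n : Int) (l : List Int) :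
    pvGaps (x :: (l ++ [n])) ≠ [] := by
  cases l <;> simp [pvGaps]

theorem pvBmax_cons (x : Int) (g : List Int) (h : g ≠ []) :
    pvBmax (x :: g) = max x (pvBmax g) := by
  match g with
  | y :: t =>
    simp only [pvBmax, List.foldl_cons]
    exact foldl_max_comm t x y

-- B's boundary-gap maximum against the reference
theorem mainB (cs : List String) : ∀ k prev : Int,
    pvBmax (pvGaps (prev :: (pvCuts k cs ++ [k + (cs.length : Int)]))) = pvMg cs (k - prev) := by
  induction cs with
  | nil =>
    intro k prev
    simp [pvCuts, PySem.List.enumerate_nil, pvGaps, pvBmax, pvMg]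
  | cons c t ih =>
    intro k prev
    by_cases h : ["A", "E", "I", "O", "U", "Y"].contains c
    · have hcuts : pvCuts k (c :: t) = k :: pvCuts (k + 1) t := by
        simp only [pvCuts, PySem.List.enumerate_cons]
        rw [List.filter_cons_of_pos (by exact h), List.map_cons]
      have hlen : k + ((c :: t).length : Int) = (k + 1) + (t.length : Int) := by
        simp; omega
      rw [hcuts, hlen]
      rw [List.cons_append, pvGaps_cons_cons]
      rw [pvBmax_cons _ _ (pvGaps_cons_append_ne_nil _ _ _)]
      rw [ih (k + 1) k]
      have h1 : k + 1 - k = (1 : Int) := by omega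
      rw [h1, pvMg_cons_pos c t (k - prev) h]
    · have hcuts : pvCuts k (c :: t) = pvCuts (k + 1) t := by
        simp only [pvCuts, PySem.List.enumerate_cons]
        rw [List.filter_cons_of_neg (by exact h)]
      have hlen : k + ((c :: t).length : Int) = (k + 1) + (t.length : Int) := by
        simp; omega
      rw [hcuts, hlen, ih (k + 1) prev]
      have h2 : k + 1 - prev = (k - prev) + 1 := by omega
      rw [h2, pvMg_cons_neg c t (k - prev) h]

theorem pvMaxD_eq_pvBmax (bs : List Int) (hne : pvGaps bs ≠ []) :
    (PySem.List.max? (pvGaps bs) (fun x => x)).getD 0 = pvBmax (pvGaps bs) := by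
  rcases hg : pvGaps bs with _ | ⟨x, g⟩
  · exact absurd hg hne
  · rw [PySem.List.max?_id_cons]
    rfl

theorem func_eq_alt (args : List String) : func args = func_alt args := by
  unfold func func_alt
  simp only []
  rw [PySem.List.slice_from_one]
  rw [PySem.List.foldl_pyRange_zero_pyGetD' args "" funcStep (1, 0)]
  rcases args with _ | ⟨c, t⟩
  · simp
  · rw [if_pos (by simp)]
    have hb : ([(-1 : Int)] ++ (((PySem.List.enumerate (c :: t) 0).filter
        (fun ic => ["A", "E", "I", "O", "U", "Y"].contains ic.2)).map (fun ic => ic.1))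
        ++ [((c :: t).length : Int)])
        = (-1 : Int) :: (pvCuts 0 (c :: t) ++ [0 + ((c :: t).length : Int)]) := by
      simp [pvCuts]
    rw [hb]
    have hpg : ((((-1 : Int) :: (pvCuts 0 (c :: t) ++ [0 + ((c :: t).length : Int)])).zip
        (((-1 : Int) :: (pvCuts 0 (c :: t) ++ [0 + ((c :: t).length : Int)])).tail)).map
        (fun ab => ab.2 - ab.1))
        = pvGaps ((-1 : Int) :: (pvCuts 0 (c :: t) ++ [0 + ((c :: t).length : Int)])) := rfl
    rw [hpg, pvMaxD_eq_pvBmax _ (pvGaps_cons_append_ne_nil _ _ _), mainB (c :: t) 0 (-1)]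
    rw [List.foldl_cons]
    by_cases h : ["A", "E", "I", "O", "U", "Y"].contains c
    · have hstep : funcStep (1, 0) c = (1, 1) := by
        simp only [funcStep, if_pos ((vowel_iff c).2 h)]
        norm_num
      rw [hstep, foldA t 1 1 (by omega) (by omega)]
      have h01 : (0 : Int) - (-1) = 1 := by omega
      rw [h01, pvMg_cons_pos c t 1 h]
      simp
    · have hc : ¬ (c = "A" ∨ c = "O" ∨ c = "Y" ∨ c = "E" ∨ c = "U" ∨ c = "I") := by
        intro hx; exact h ((vowel_iff c).1 hx)
      have hstep : funcStep (1, 0) c = (2, 2) := by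
        simp only [funcStep, if_neg hc]
        norm_num
      rw [hstep, foldA t 2 2 (by omega) (by omega)]
      have h01 : (0 : Int) - (-1) = 1 := by omega
      rw [h01, pvMg_cons_neg c t 1 h]
      have := pvMg_ge t 2
      simp only [List.nil_append, List.cons.injEq, and_true,
        show (1 : Int) + 1 = 2 from rfl]
      omega

-- ===== VERDICT (by name: the statement is the Claim_ definition above) =====
theorem func_spec : Claim_equal_func := by
  intro args hdom
  exact func_eq_alt args
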